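-- pv_equiv track=rewrite | github.com/ShivaanjayNarula/Algorithm | Moose’s Algorithm/code.py | moose_algorithm
-- ===== SOURCE A (Python) =====
-- def moose_algorithm(arr):
--     n = len(arr)
--     dp = [float('inf')] * n
--     dp[0] = arr[0]
--
--     for i in range(1, n):
--         for j in range(i - 1, -1, -1):
--             dp[i] = min(dp[i], min(arr[i], dp[j]))
--
--     return dp
-- ===== SOURCE B (Python) =====
-- def moose_algorithm(arr):
--     # Single pass: dp[i] is just the running minimum of arr[0..i].
--     out = []
--     m = arr[0]
--     for x in arr:
--         m = min(m, x)
--         out.append(m)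
--     return out
-- ===== Notes on version B (the rewrite author's own statement) =====
-- stated objective: faster
-- what changed: Replaced the O(n^2) nested rescans of dp with a single pass maintaining the running minimum (dp[i] equals min(arr[0..i])).
import Mathlib
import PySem

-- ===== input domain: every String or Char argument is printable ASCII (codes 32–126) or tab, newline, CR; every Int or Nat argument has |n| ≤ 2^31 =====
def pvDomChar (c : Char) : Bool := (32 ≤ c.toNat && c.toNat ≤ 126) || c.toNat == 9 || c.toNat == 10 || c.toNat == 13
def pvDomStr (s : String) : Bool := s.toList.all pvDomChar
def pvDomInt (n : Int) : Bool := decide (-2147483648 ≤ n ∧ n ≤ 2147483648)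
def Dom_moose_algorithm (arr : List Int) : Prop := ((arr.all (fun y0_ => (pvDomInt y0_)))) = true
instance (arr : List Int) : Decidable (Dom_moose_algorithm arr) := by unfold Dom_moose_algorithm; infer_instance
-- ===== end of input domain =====

-- B replaces A's O(n^2) nested dp rescans with a single running-minimum pass (asymptotic speed-up).


-- ===== PORT A =====
-- Python's float('inf') placeholder is modelled by `none`; pyMinO is Python's `min`
-- on {int, inf} (value-wise; exact, since min on ints returns the smaller value).
def pyMinO (a b : Option Int) : Option Int :=
  match a, b with
  | none, b => b
  | some x, none => some x
  | some x, some y => some (min x y)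

-- Literal port of A. Indices i (from range(1,n)) and j (from range(i-1,-1,-1)) are
-- nonnegative and in range, so .toNat indexing with getD is exact here; the write of
-- the first element raises IndexError on the empty list (excluded by Pre_); the final .map strips the Option
-- wrapper (on Pre_ every entry is some, proved below, so the default is never used).
def moose_algorithm (arr : List Int) : List Int :=
  let n : Int := (arr.length : Int)
  let dp : List (Option Int) := (List.replicate arr.length none).set 0 (some (arr.getD 0 0))
  let dp := (PySem.List.pyRange 1 n 1).foldl (fun dp i =>
    (PySem.List.pyRange (i-1) (-1) (-1)).foldl (fun dp j =>
      dp.set i.toNat (pyMinO (dp.getD i.toNat none)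
        (pyMinO (some (arr.getD i.toNat 0)) (dp.getD j.toNat none)))) dp) dp
  dp.map (fun o => o.getD 0)

-- ===== PORT B =====
-- Source B's loop: running minimum m, appending min(m, x) for each element.
def prefLoop (m : Int) : List Int → List Int
  | [] => []
  | x :: xs => (min m x) :: prefLoop (min m x) xs

-- reading the first element raises IndexError on the empty list; excluded by Pre_.
def moose_algorithm_alt (arr : List Int) : List Int :=
  match arr with
  | [] => []
  | a :: _ => prefLoop a arr

-- ===== PRECONDITION & SPEC =====
-- Both A and B read the first element, which raises IndexError on the empty list.
def Pre_moose_algorithm (arr : List Int) : Prop := arr ≠ []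
instance (arr : List Int) : Decidable (Pre_moose_algorithm arr) := by
  unfold Pre_moose_algorithm; infer_instance

def pvWitness_moose_algorithm : List Int := ([3, 1, 2])

def Spec_moose_algorithm (arr : List Int) (out : List Int) : Prop := out = moose_algorithm_alt arr
instance (arr : List Int) (out : List Int) : Decidable (Spec_moose_algorithm arr out) := by unfold Spec_moose_algorithm; infer_instance

-- ===== CLAIM (what is proved, stated in full; the proofs are below) =====
def Claim_equal_moose_algorithm : Prop := ∀ (arr : List Int), Dom_moose_algorithm arr → Pre_moose_algorithm arr → Spec_moose_algorithm arr (moose_algorithm arr)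

-- ===== LEMMAS AND PROOFS =====

theorem prefLoop_length (m : Int) (xs : List Int) : (prefLoop m xs).length = xs.length := by
  induction xs generalizing m with
  | nil => rfl
  | cons x xs ih => simp [prefLoop, ih]

theorem prefLoop_getD_succ (m : Int) (xs : List Int) (k : Nat) (hk : k + 1 < xs.length) :
    (prefLoop m xs).getD (k + 1) 0
      = min ((prefLoop m xs).getD k 0) (xs.getD (k + 1) 0) := by
  induction xs generalizing m k with
  | nil => simp at hk
  | cons x xs ih =>
    cases k with
    | zero =>
      cases xs with
      | nil => simp at hk
      | cons y ys => simp [prefLoop, min_assoc]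
    | succ k =>
      simp only [List.length_cons] at hk
      simpa [prefLoop] using ih (min m x) k (by omega)

-- prefix minima are nonincreasing
theorem prefLoop_anti (m : Int) (xs : List Int) (j k : Nat) (hjk : j ≤ k) (hk : k < xs.length) :
    (prefLoop m xs).getD k 0 ≤ (prefLoop m xs).getD j 0 := by
  induction k with
  | zero =>
    have hj : j = 0 := by omega
    subst hj; exact le_refl _
  | succ k ih =>
    rcases Nat.eq_or_lt_of_le hjk with rfl | hlt
    · exact le_refl _
    · have h1 : (prefLoop m xs).getD (k+1) 0 ≤ (prefLoop m xs).getD k 0 := by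
        rw [prefLoop_getD_succ m xs k hk]; exact min_le_left _ _
      exact le_trans h1 (ih (by omega) (by omega))

-- writing back the current value is a no-op
theorem set_getD_self (dp : List (Option Int)) (i : Nat) :
    dp.set i (dp.getD i none) = dp := by
  by_cases hi : i < dp.length
  · rw [List.getD_eq_getElem?_getD, List.getElem?_eq_getElem hi]
    exact List.set_getElem_self hi
  · exact List.set_eq_of_length_le (by omega)

-- the inner j-loop only writes position i; it equals a single set with a folded value
theorem inner_fold_set (i : Nat) (ai : Int) (js : List Int)
    (dp : List (Option Int))
    (hjs : ∀ j ∈ js, j.toNat ≠ i) :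
    js.foldl (fun dp (j : Int) =>
        dp.set i (pyMinO (dp.getD i none) (pyMinO (some ai) (dp.getD j.toNat none)))) dp
      = dp.set i (js.foldl (fun acc (j : Int) =>
          pyMinO acc (pyMinO (some ai) (dp.getD j.toNat none))) (dp.getD i none)) := by
  induction js generalizing dp with
  | nil =>
    rw [List.foldl_nil, List.foldl_nil, set_getD_self]
  | cons j js ih =>
    simp only [List.foldl_cons]
    set v := pyMinO (dp.getD i none) (pyMinO (some ai) (dp.getD j.toNat none)) with hv
    by_cases hi : i < dp.length
    · rw [ih (dp.set i v) (fun j hj => hjs j (List.mem_cons_of_mem _ hj))]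
      have hgv : (dp.set i v).getD i none = v := by
        simp [List.getD_eq_getElem?_getD, List.getElem?_set_self hi]
      have hgj : ∀ (j' : Int), j' ∈ js → (dp.set i v).getD j'.toNat none = dp.getD j'.toNat none := by
        intro j' hj'
        have : j'.toNat ≠ i := hjs j' (List.mem_cons_of_mem _ hj')
        simp [List.getD_eq_getElem?_getD, List.getElem?_set_ne (by omega : i ≠ j'.toNat)]
      rw [List.set_set, hgv]
      congr 1
      apply PySem.List.foldl_congr_mem
      intro acc j' hj'
      rw [hgj j' hj']
    · have hnoop : ∀ w, dp.set i w = dp := fun w => List.set_eq_of_length_le (by omega)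
      rw [hnoop, ih dp (fun j hj => hjs j (List.mem_cons_of_mem _ hj)), hnoop, hnoop]

-- folding further mins that are all ≥ m0 leaves some (min ai m0) unchanged
theorem fold_min_absorb (ai m0 : Int) (js : List Int) (g : Int → Option Int)
    (hg : ∀ j ∈ js, ∃ v, g j = some v ∧ m0 ≤ v) :
    js.foldl (fun acc (j : Int) => pyMinO acc (pyMinO (some ai) (g j))) (some (min ai m0))
      = some (min ai m0) := by
  induction js with
  | nil => rfl
  | cons j js ih =>
    obtain ⟨v, hv, hle⟩ := hg j (List.mem_cons_self)
    simp only [List.foldl_cons, hv]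
    have h1 : pyMinO (some (min ai m0)) (pyMinO (some ai) (some v)) = some (min ai m0) := by
      simp only [pyMinO, Option.some.injEq]
      omega
    rw [h1]
    exact ih (fun j hj => hg j (List.mem_cons_of_mem _ hj))

-- shape of the dp list after the outer loop has processed i = 1 .. k-1
def dpState (arr : List Int) (a : Int) (k : Nat) : List (Option Int) :=
  ((prefLoop a arr).map some).take k ++ List.replicate (arr.length - k) none

theorem dpState_getD_lt (arr : List Int) (a : Int) (k j : Nat) (hj : j < k)
    (hjl : j < arr.length) :
    (dpState arr a k).getD j none = some ((prefLoop a arr).getD j 0) := by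
  have hPj : j < (prefLoop a arr).length := by rw [prefLoop_length]; exact hjl
  have hlt : j < (((prefLoop a arr).map some).take k).length := by
    simp [prefLoop_length]; omega
  rw [dpState, List.getD_eq_getElem?_getD, List.getElem?_append_left hlt,
    List.getElem?_take_of_lt hj, List.getElem?_map, List.getElem?_eq_getElem hPj,
    List.getD_eq_getElem?_getD, List.getElem?_eq_getElem hPj]
  rfl

theorem dpState_getD_ge (arr : List Int) (a : Int) (k j : Nat) (hj : k ≤ j)
    (hjl : j < arr.length) :
    (dpState arr a k).getD j none = none := by
  have hlen : (((prefLoop a arr).map some).take k).length = k := by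
    simp [prefLoop_length]; omega
  rw [dpState, List.getD_eq_getElem?_getD,
    List.getElem?_append_right (by omega), hlen, List.getElem?_replicate]
  split <;> rfl

theorem dpState_length (arr : List Int) (a : Int) (k : Nat) (hk : k ≤ arr.length) :
    (dpState arr a k).length = arr.length := by
  simp [dpState, prefLoop_length]; omega

theorem dpState_set (arr : List Int) (a : Int) (k : Nat) (hk : k < arr.length) :
    (dpState arr a k).set k (some ((prefLoop a arr).getD k 0)) = dpState arr a (k + 1) := by
  apply List.ext_getElem
  · rw [List.length_set, dpState_length arr a k (by omega), dpState_length arr a (k+1) (by omega)]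
  · intro n h1 h2
    simp only [List.length_set] at h1
    have hnl : n < arr.length := by rw [dpState_length arr a k (by omega)] at h1; exact h1
    have conv : ∀ (L : List (Option Int)) (hn : n < L.length), L[n] = L.getD n none := by
      intro L hn
      rw [List.getD_eq_getElem?_getD, List.getElem?_eq_getElem hn]
      rfl
    by_cases hn : n = k
    · subst hn
      rw [List.getElem_set_self, conv _ h2, dpState_getD_lt arr a (n+1) n (by omega) hnl]
    · rw [List.getElem_set_ne (by omega), conv _ h1, conv _ h2]
      by_cases hlt : n < k
      · rw [dpState_getD_lt arr a k n hlt hnl, dpState_getD_lt arr a (k+1) n (by omega) hnl]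
      · rw [dpState_getD_ge arr a k n (by omega) hnl, dpState_getD_ge arr a (k+1) n (by omega) hnl]

theorem moose_algorithm_eq (arr : List Int) (h : arr ≠ []) :
    moose_algorithm arr = moose_algorithm_alt arr := by
  obtain ⟨a, rest, rfl⟩ := List.exists_cons_of_ne_nil h
  set arr := a :: rest with harr
  set P := prefLoop a arr with hP
  have hPlen : P.length = arr.length := prefLoop_length a arr
  -- the initial dp is dpState arr a 1
  have hinit : (List.replicate arr.length none).set 0 (some (arr.getD 0 0)) = dpState arr a 1 := by
    rw [harr]
    simp [dpState, List.replicate_succ, prefLoop, List.take]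
  -- invariant: processing pyRange 1 k 1 yields dpState arr a k, for 1 ≤ k ≤ arr.length
  have key : ∀ k : Nat, 1 ≤ k → k ≤ arr.length →
      (PySem.List.pyRange 1 (k : Int) 1).foldl (fun dp i =>
        (PySem.List.pyRange (i-1) (-1) (-1)).foldl (fun dp j =>
          dp.set i.toNat (pyMinO (dp.getD i.toNat none)
            (pyMinO (some (arr.getD i.toNat 0)) (dp.getD j.toNat none)))) dp)
        (dpState arr a 1) = dpState arr a k := by
    intro k hk1 hk2
    induction k with
    | zero => omega
    | succ k ih =>
      rcases Nat.eq_or_lt_of_le hk1 with h1 | h1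
      · rw [← h1]
        rw [show PySem.List.pyRange 1 (((1:Nat) : Int)) 1 = [] from
          PySem.List.pyRange_one_eq_nil (by norm_num)]
        rfl
      · have hk : 1 ≤ k := by omega
        have hkl : k < arr.length := by omega
        have hsplit : PySem.List.pyRange 1 (((k : Nat) + 1 : Nat) : Int) 1
            = PySem.List.pyRange 1 (k : Int) 1 ++ [(k : Int)] := by
          push_cast
          exact PySem.List.pyRange_one_succ_right (by exact_mod_cast hk)
        rw [hsplit, List.foldl_append, ih hk (by omega)]
        simp only [List.foldl_cons, List.foldl_nil]
        -- inner loop at i = k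
        have hjs : ∀ j ∈ PySem.List.pyRange ((k : Int) - 1) (-1) (-1), j.toNat ≠ (k : Int).toNat := by
          intro j hj
          rw [PySem.List.mem_pyRange_neg_one] at hj
          omega
        rw [inner_fold_set (k : Int).toNat (arr.getD (k : Int).toNat 0) _ _ hjs]
        have htn : (k : Int).toNat = k := by simp
        rw [htn]
        have hdpk : (dpState arr a k).getD k none = none := dpState_getD_ge arr a k k (le_refl _) hkl
        -- split the countdown range: first j = k-1, then the rest
        have hcons : PySem.List.pyRange ((k : Int) - 1) (-1) (-1)
            = ((k : Int) - 1) :: PySem.List.pyRange ((k : Int) - 1 - 1) (-1) (-1) :=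
          PySem.List.pyRange_neg_one_cons (by omega)
        rw [hcons, hdpk]
        simp only [List.foldl_cons]
        have hj1 : ((k : Int) - 1).toNat = k - 1 := by omega
        have hval : (dpState arr a k).getD ((k : Int) - 1).toNat none = some (P.getD (k - 1) 0) := by
          rw [hj1, hP]; exact dpState_getD_lt arr a k (k-1) (by omega) (by omega)
        rw [hval]
        have hstep : pyMinO none (pyMinO (some (arr.getD k 0)) (some (P.getD (k-1) 0)))
            = some (min (arr.getD k 0) (P.getD (k-1) 0)) := rfl
        rw [hstep]
        have habs : (PySem.List.pyRange ((k : Int) - 1 - 1) (-1) (-1)).foldl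
            (fun acc (j : Int) => pyMinO acc (pyMinO (some (arr.getD k 0)) ((dpState arr a k).getD j.toNat none)))
            (some (min (arr.getD k 0) (P.getD (k-1) 0)))
            = some (min (arr.getD k 0) (P.getD (k-1) 0)) := by
          apply fold_min_absorb
          intro j hj
          rw [PySem.List.mem_pyRange_neg_one] at hj
          refine ⟨P.getD j.toNat 0, ?_, ?_⟩
          · rw [hP]; exact dpState_getD_lt arr a k j.toNat (by omega) (by omega)
          · exact prefLoop_anti a arr j.toNat (k-1) (by omega) (by rw [← hPlen] at hkl; omega)
        rw [habs]
        have hPk : min (arr.getD k 0) (P.getD (k-1) 0) = P.getD k 0 := by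
          have hs := prefLoop_getD_succ a arr (k - 1) (by omega)
          rw [← hP, (by omega : k - 1 + 1 = k)] at hs
          rw [hs, min_comm]
        rw [hPk]
        exact dpState_set arr a k hkl
  have hfin := key arr.length (by rw [harr]; simp) (le_refl _)
  simp only [moose_algorithm]
  rw [hinit, hfin, dpState]
  have hfull : ((P.map some).take arr.length) = P.map some := by
    apply List.take_of_length_le
    simp [hPlen]
  rw [← hP, hfull, Nat.sub_self]
  simp only [List.replicate_zero, List.append_nil, List.map_map]
  have hid : ((fun (o : Option Int) => o.getD 0) ∘ some) = id := rfl
  rw [hid, List.map_id]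
  show P = moose_algorithm_alt (a :: rest)
  simp only [moose_algorithm_alt]
  exact hP

-- ===== VERDICT (by name: the statement is the Claim_ definition above) =====
theorem moose_algorithm_spec : Claim_equal_moose_algorithm := by
  intro arr _ hpre
  unfold Spec_moose_algorithm
  exact moose_algorithm_eq arr hpre
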